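-- pv_equiv track=rewrite | github.com/LSIR/gsn | gsn/tools/backlog/python3/ScheduleHandler.py | _getSpecialParameter
-- ===== SOURCE A (Python) =====
-- import string
--
-- def _getSpecialParameter(commandstring, param_name):
--     param_start_index = commandstring.lower().find(param_name)
--     if param_start_index == -1:
--         return (None, commandstring)
--     param_end_index = param_start_index+len(param_name)
--
--     try:
--         if commandstring[param_end_index] != '=':
--             raise TypeError('wrongly formatted \'' + param_name + '\' parameter in the schedule file (format: ' + param_name + '=INTEGER)')
--         else:
--             param_end_index += 1
--     except IndexError as e:
--         raise TypeError('wrongly formatted \'' + param_name + '\' parameter in the schedule file (format: ' + param_name + '=INTEGER)')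
--
--     digit = ''
--     while True:
--         try:
--             if commandstring[param_end_index] in string.digits:
--                 digit += commandstring[param_end_index]
--                 param_end_index += 1
--             elif commandstring[param_end_index] in string.whitespace:
--                 param_end_index += 1
--                 break
--             else:
--                 raise TypeError('wrongly formatted \'' + param_name + '\' parameter in the schedule file (format: ' + param_name + '=INTEGER)')
--         except IndexError:
--             break
--
--     if not digit:
--         raise TypeError('wrongly formatted \'' + param_name + '\' parameter in the schedule file (format: ' + param_name + '=INTEGER)')
--
--     commandstring = commandstring[:param_start_index].strip() + ' ' + commandstring[param_end_index:].strip()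
--     return (int(digit), commandstring)
-- ===== SOURCE B (Python) =====
-- import re
-- import string
--
-- _PARAM_RE_CACHE = {}
--
-- def _getSpecialParameter(commandstring, param_name):
--     param_start_index = commandstring.lower().find(param_name)
--     if param_start_index == -1:
--         return (None, commandstring)
--     param_end_index = param_start_index + len(param_name)
--     # anchored ASCII match: '=', one or more ASCII digits, then ASCII whitespace or end
--     pat = _PARAM_RE_CACHE.get(param_name)
--     if pat is None:
--         pat = re.compile('=([0-9]+)($|[%s])' % re.escape(string.whitespace))
--         _PARAM_RE_CACHE[param_name] = pat
--     m = pat.match(commandstring, param_end_index)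
--     if m is None:
--         raise TypeError('wrongly formatted \'' + param_name + '\' parameter in the schedule file (format: ' + param_name + '=INTEGER)')
--     value = int(m.group(1))
--     end = m.end()  # consumes the single terminating whitespace char, if any
--     commandstring = commandstring[:param_start_index].strip() + ' ' + commandstring[end:].strip()
--     return (value, commandstring)
-- ===== Notes on version B (the rewrite author's own statement) =====
-- stated objective: idiomatic
-- what changed: The hand-written digit-accumulating while loop with its try/except IndexError control flow is replaced by a single anchored ASCII regex match ('=' then [0-9]+ then ASCII whitespace or end) whose captured group gives the integer and whose match end gives the resume index.
import Mathlib
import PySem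

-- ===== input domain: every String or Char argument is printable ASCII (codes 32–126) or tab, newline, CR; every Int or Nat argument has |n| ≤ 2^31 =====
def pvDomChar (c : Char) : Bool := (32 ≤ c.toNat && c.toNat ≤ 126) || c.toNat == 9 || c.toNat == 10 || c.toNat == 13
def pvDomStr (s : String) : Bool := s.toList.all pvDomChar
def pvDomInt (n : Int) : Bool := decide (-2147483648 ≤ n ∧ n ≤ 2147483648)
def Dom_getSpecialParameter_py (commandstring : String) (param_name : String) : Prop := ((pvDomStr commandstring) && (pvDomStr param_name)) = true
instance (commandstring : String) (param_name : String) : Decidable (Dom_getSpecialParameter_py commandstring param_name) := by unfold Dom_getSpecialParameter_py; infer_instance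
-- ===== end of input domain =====

-- B replaces A's hand-written digit-accumulating while loop (with try/except control flow) by an
-- anchored ASCII-regex-style match ('=' then [0-9]+ then ASCII whitespace or end); idiomatic, same cost.
-- Where Python A raises TypeError, B raises the same TypeError; both ports return (none, "") there
-- (those inputs lie outside Pre_getSpecialParameter_py).

-- ===== PORT A =====
-- the 'while True' digit loop of A: index k walks cs; returns (digit, end index), none = TypeError raise
def pvLoopA (cs : List Char) (k : Nat) (digit : List Char) : Option (List Char × Nat) :=
  match h : cs[k]? with
  | none => some (digit, k)                   -- IndexError: break
  | some c =>
    if PySem.Chars.isdigit c then pvLoopA cs (k + 1) (digit ++ [c])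
    else if PySem.Chars.isspace c then some (digit, k + 1)
    else none
termination_by cs.length - k
decreasing_by
  have : k < cs.length := by
    by_contra hk
    simp [List.getElem?_eq_none (by omega : cs.length ≤ k)] at h
  omega

def getSpecialParameter_py (commandstring : String) (param_name : String) : Option Int × String :=
  let s := commandstring.toList
  let p := param_name.toList
  let i := PySem.Chars.find (PySem.Chars.lower s) p
  if i = -1 then (none, commandstring)
  else
    let start := i.toNat
    let j := start + p.length
    match s[j]? with
    | none => (none, "")                       -- IndexError → TypeError raise
    | some c =>
      if c ≠ '=' then (none, "")               -- TypeError raise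
      else
        match pvLoopA s (j + 1) [] with
        | none => (none, "")                   -- TypeError raise inside the loop
        | some (digit, endIdx) =>
          if digit = [] then (none, "")        -- 'if not digit' → TypeError raise
          else
            match PySem.Int.ofChars? digit with
            | none => (none, "")               -- unreachable: digit is nonempty decimal digits
            | some v =>
              (some v, String.mk (PySem.Chars.strip (s.take start) ++
                                  ' ' :: PySem.Chars.strip (s.drop endIdx)))

-- ===== PORT B =====
-- exact hand port of B's anchored regex  =([0-9]+)($|[<ASCII whitespace>])  matched at the start of
-- `tail`: returns the captured digit group and the match length (m.end() - match start), none = no match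
def pvMatchEq (tail : List Char) : Option (List Char × Nat) :=
  match tail with
  | [] => none
  | c :: rest =>
    if c = '=' then
      let ds := rest.takeWhile PySem.Chars.isdigit
      if ds = [] then none
      else
        match rest.drop ds.length with
        | [] => some (ds, 1 + ds.length)                                  -- '$' alternative
        | w :: _ => if PySem.Chars.isspace w then some (ds, 2 + ds.length) else none
    else none

def getSpecialParameter_py_alt (commandstring : String) (param_name : String) : Option Int × String :=
  let s := commandstring.toList
  let p := param_name.toList
  let i := PySem.Chars.find (PySem.Chars.lower s) p
  if i = -1 then (none, commandstring)
  else
    let start := i.toNat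
    let j := start + p.length
    match pvMatchEq (s.drop j) with
    | none => (none, "")                       -- TypeError raise
    | some (ds, mlen) =>
      match PySem.Int.ofChars? ds with
      | none => (none, "")                     -- unreachable: ds is nonempty decimal digits
      | some v =>
        (some v, String.mk (PySem.Chars.strip (s.take start) ++
                            ' ' :: PySem.Chars.strip (s.drop (j + mlen))))

-- ===== PRECONDITION & SPEC =====
-- Pre_ holds exactly where Python A returns normally: either the parameter name is absent, or it is
-- followed by '=', one or more ASCII digits, and then ASCII whitespace or the end of the string.
def Pre_getSpecialParameter_py (commandstring : String) (param_name : String) : Prop :=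
  let s := commandstring.toList
  let p := param_name.toList
  let i := PySem.Chars.find (PySem.Chars.lower s) p
  i = -1 ∨
    (let j := i.toNat + p.length
     s[j]? = some '=' ∧
     ∃ m : Nat, m ≤ s.length ∧ 1 ≤ m ∧
       (∀ t : Nat, t < m → (s[j + 1 + t]?.any PySem.Chars.isdigit) = true) ∧
       (j + 1 + m = s.length ∨ (s[j + 1 + m]?.any PySem.Chars.isspace) = true))

instance (commandstring : String) (param_name : String) : Decidable (Pre_getSpecialParameter_py commandstring param_name) := by
  unfold Pre_getSpecialParameter_py; infer_instance

def pvWitness_getSpecialParameter_py : String × String := ("run rate=42 now", "rate")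

def Spec_getSpecialParameter_py (commandstring : String) (param_name : String) (out : Option Int × String) : Prop := out = getSpecialParameter_py_alt commandstring param_name
instance (commandstring : String) (param_name : String) (out : Option Int × String) : Decidable (Spec_getSpecialParameter_py commandstring param_name out) := by unfold Spec_getSpecialParameter_py; infer_instance

-- ===== CLAIM (what is proved, stated in full; the proofs are below) =====
def Claim_equal_getSpecialParameter_py : Prop := ∀ (commandstring : String) (param_name : String), Dom_getSpecialParameter_py commandstring param_name → Pre_getSpecialParameter_py commandstring param_name → Spec_getSpecialParameter_py commandstring param_name (getSpecialParameter_py commandstring param_name)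

-- ===== LEMMAS AND PROOFS =====

-- A's loop computed from the suffix of cs it still has to read
theorem pvLoopA_spec (cs : List Char) :
    ∀ tail k acc, cs.drop k = tail →
      pvLoopA cs k acc =
        (let ds := tail.takeWhile PySem.Chars.isdigit
         match tail.drop ds.length with
         | [] => some (acc ++ ds, k + ds.length)
         | w :: _ =>
           if PySem.Chars.isspace w then some (acc ++ ds, k + ds.length + 1) else none) := by
  intro tail
  induction tail with
  | nil =>
    intro k acc h
    have hk : cs[k]? = none := by
      have h0 : (List.drop k cs)[0]? = cs[k + 0]? := List.getElem?_drop
      rw [h] at h0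
      simpa using h0.symm
    rw [pvLoopA]
    split
    · simp
    · next c heq => rw [hk] at heq; cases heq
  | cons c rest ih =>
    intro k acc h
    have hk : cs[k]? = some c := by
      have h0 : (List.drop k cs)[0]? = cs[k + 0]? := List.getElem?_drop
      rw [h] at h0
      simpa using h0.symm
    have hdrop : cs.drop (k + 1) = rest := by
      have h1 : cs.drop (k + 1) = (cs.drop k).drop 1 := by rw [List.drop_drop]
      simpa [h] using h1
    rw [pvLoopA]
    split
    · next heq => rw [hk] at heq; cases heq
    · next c' heq =>
      rw [hk] at heq
      cases heq
      by_cases hd : PySem.Chars.isdigit c = true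
      · rw [if_pos hd, ih (k + 1) (acc ++ [c]) hdrop]
        simp only [List.takeWhile_cons, hd, if_true, List.length_cons, List.drop_succ_cons,
          List.append_assoc, List.singleton_append]
        have harith : k + 1 + (List.takeWhile PySem.Chars.isdigit rest).length
            = k + ((List.takeWhile PySem.Chars.isdigit rest).length + 1) := by omega
        cases List.drop (List.takeWhile PySem.Chars.isdigit rest).length rest <;> simp [harith]
      · rw [if_neg hd]
        by_cases hw : PySem.Chars.isspace c = true
        · simp [List.takeWhile_cons, hd, hw]
        · simp [List.takeWhile_cons, hd, hw]

-- A = B on every input (the raise paths of both ports return (none, ""))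
theorem pv_eq_all (cs pn : String) :
    getSpecialParameter_py cs pn = getSpecialParameter_py_alt cs pn := by
  unfold getSpecialParameter_py getSpecialParameter_py_alt
  set s := cs.toList with hs
  set p := pn.toList with hp
  by_cases hfind : PySem.Chars.find (PySem.Chars.lower s) p = -1
  · simp [hfind]
  · simp only [hfind, if_false]
    set j := (PySem.Chars.find (PySem.Chars.lower s) p).toNat + p.length with hj
    cases hgj : s[j]? with
    | none =>
      have hdrop : s.drop j = [] := by
        have hlen : s.length ≤ j := by
          by_contra hc
          simp [List.getElem?_eq_getElem (by omega : j < s.length)] at hgj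
        simp [List.drop_eq_nil_of_le hlen]
      simp [hgj, hdrop, pvMatchEq]
    | some c =>
      have hlt : j < s.length := (List.getElem?_eq_some_iff.mp hgj).1
      have hdrop : s.drop j = c :: s.drop (j + 1) := by
        rw [List.drop_eq_getElem_cons hlt]
        have hcc : s[j] = c := by
          have h0 := List.getElem?_eq_getElem hlt
          rw [hgj] at h0; exact (Option.some.injEq _ _).mp h0.symm
        rw [hcc]
      by_cases hc : c = '='
      · subst hc
        simp only [hgj, hdrop, pvMatchEq, ne_eq, not_true_eq_false, if_false, if_pos rfl]
        rw [pvLoopA_spec s (s.drop (j + 1)) (j + 1) [] rfl]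
        simp only []
        by_cases hnil : (s.drop (j + 1)).takeWhile PySem.Chars.isdigit = []
        · -- empty digit group: both sides are the TypeError raise → (none, "")
          rcases htail : s.drop (j + 1) with _ | ⟨w, ws⟩
          · simp [htail, hnil]
          · rw [htail] at hnil
            by_cases hw : PySem.Chars.isspace w = true
            · simp [htail, hnil, hw]
            · simp [htail, hnil, hw]
        · rcases hrest : (s.drop (j + 1)).drop ((s.drop (j + 1)).takeWhile PySem.Chars.isdigit).length
              with _ | ⟨w, ws⟩
          · have harith : j + 1 + ((s.drop (j + 1)).takeWhile PySem.Chars.isdigit).length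
                = j + (1 + ((s.drop (j + 1)).takeWhile PySem.Chars.isdigit).length) := by omega
            simp [hrest, hnil, harith]
          · by_cases hw : PySem.Chars.isspace w = true
            · have harith : j + 1 + ((s.drop (j + 1)).takeWhile PySem.Chars.isdigit).length + 1
                  = j + (2 + ((s.drop (j + 1)).takeWhile PySem.Chars.isdigit).length) := by omega
              simp [hrest, hnil, hw, harith]
            · simp [hrest, hnil, hw]
      · simp [hgj, hdrop, pvMatchEq, hc]

-- ===== VERDICT (by name: the statement is the Claim_ definition above) =====
theorem getSpecialParameter_py_spec : Claim_equal_getSpecialParameter_py := by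
  intro cs pn _ _
  unfold Spec_getSpecialParameter_py
  exact pv_eq_all cs pn
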